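-- pv_equiv track=rewrite | github.com/eerimoq/asn1tools | asn1tools/source/rust/utils.py | indent_lines
-- ===== SOURCE A (Python) =====
-- def strip_blank_lines(lines):
--     try:
--         while lines[0] == '':
--             del lines[0]
--
--         while lines[-1] == '':
--             del lines[-1]
--     except IndexError:
--         pass
--
--     stripped = []
--
--     for line in lines:
--         if line == '' and stripped[-1] == '':
--             continue
--
--         stripped.append(line)
--
--     return stripped
--
-- def indent_lines(lines, width=4):
--     indented_lines = []
--
--     for line in lines:
--         if line:
--             indented_line = width * ' ' + line
--         else:
--             indented_line = line
--
--         indented_lines.append(indented_line)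
--
--     return strip_blank_lines(indented_lines)
-- ===== SOURCE B (Python) =====
-- def indent_lines(lines, width=4):
--     result = []
--     for line in lines:
--         indented = width * ' ' + line if line else line
--         if indented == '' and (not result or result[-1] == ''):
--             continue
--         result.append(indented)
--     while result and result[-1] == '':
--         result.pop()
--     return result
-- ===== Notes on version B (the rewrite author's own statement) =====
-- stated objective: simpler
-- what changed: Replaced A's four passes (indent loop, two del-loops stripping leading/trailing blanks, and a collapse loop) by one forward loop that indents and skips leading/duplicate blanks as it appends, plus a final trailing-blank trim.
import Mathlib
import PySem

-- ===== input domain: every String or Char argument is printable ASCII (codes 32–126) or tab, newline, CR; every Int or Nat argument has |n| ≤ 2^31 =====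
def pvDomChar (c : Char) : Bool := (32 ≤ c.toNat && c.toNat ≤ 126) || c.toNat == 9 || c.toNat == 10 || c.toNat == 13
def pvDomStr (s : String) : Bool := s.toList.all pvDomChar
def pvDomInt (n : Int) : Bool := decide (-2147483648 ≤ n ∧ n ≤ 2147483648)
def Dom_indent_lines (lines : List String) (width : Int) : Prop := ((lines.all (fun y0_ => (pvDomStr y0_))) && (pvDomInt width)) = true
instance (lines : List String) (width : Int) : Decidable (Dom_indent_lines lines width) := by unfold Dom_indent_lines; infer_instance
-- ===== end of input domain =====

-- B merges A's indent pass and three blank-stripping sweeps into one forward pass plus a trailing trim (simpler decomposition, same O(n)).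


-- ===== PORT A =====
-- 'while lines[0] == '': del lines[0]'  (the IndexError on an all-blank list is caught: result [])
def pyDropLeadingBlanks : List String → List String
  | [] => []
  | x :: xs => if x = "" then pyDropLeadingBlanks xs else x :: xs

-- 'while lines[-1] == '': del lines[-1]'
def pyDropTrailingBlanks : List String → List String
  | [] => []
  | x :: xs =>
      if x = "" ∧ pyDropTrailingBlanks xs = [] then [] else x :: pyDropTrailingBlanks xs

def strip_blank_lines (lines : List String) : List String :=
  let lines := pyDropTrailingBlanks (pyDropLeadingBlanks lines)
  lines.foldl
    (fun stripped line =>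
      if line = "" ∧ stripped.getLast? = some "" then stripped else stripped ++ [line]) []

-- 'width * " "' ported by hand as char repetition (exact: Python repeats, negative count gives '')
def indent_lines (lines : List String) (width : Int) : List String :=
  strip_blank_lines
    (lines.foldl
      (fun indented_lines line =>
        indented_lines ++
          [if line ≠ "" then String.ofList (PySem.List.pyRepeat [' '] width) ++ line else line]) [])

-- ===== PORT B =====
-- 'while result and result[-1] == '': result.pop()'
def pyPopTrailingBlanks : List String → List String
  | [] => []
  | x :: xs =>
      if x = "" ∧ pyPopTrailingBlanks xs = [] then [] else x :: pyPopTrailingBlanks xs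

def indent_lines_alt (lines : List String) (width : Int) : List String :=
  pyPopTrailingBlanks
    (lines.foldl
      (fun result line =>
        let indented := if line ≠ "" then String.ofList (PySem.List.pyRepeat [' '] width) ++ line else line
        if indented = "" ∧ (result = [] ∨ result.getLast? = some "") then result
        else result ++ [indented]) [])

-- ===== PRECONDITION & SPEC =====
def Spec_indent_lines (lines : List String) (width : Int) (out : List String) : Prop := out = indent_lines_alt lines width
instance (lines : List String) (width : Int) (out : List String) : Decidable (Spec_indent_lines lines width out) := by unfold Spec_indent_lines; infer_instance

-- ===== CLAIM (what is proved, stated in full; the proofs are below) =====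
def Claim_equal_indent_lines : Prop := ∀ (lines : List String) (width : Int), Dom_indent_lines lines width → Spec_indent_lines lines width (indent_lines lines width)

-- ===== LEMMAS AND PROOFS =====

-- the common "skip a blank after a blank (state b), keep the rest" transform both folds compute
def blankT : Bool → List String → List String
  | _, [] => []
  | b, x :: xs => if x = "" then (if b then blankT true xs else "" :: blankT true xs) else x :: blankT false xs

theorem foldl_strip (M : List String) (acc : List String) :
    M.foldl (fun stripped line =>
      if line = "" ∧ stripped.getLast? = some "" then stripped else stripped ++ [line]) acc
    = acc ++ blankT (decide (acc.getLast? = some "")) M := by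
  induction M generalizing acc with
  | nil => simp [blankT]
  | cons x xs ih =>
    by_cases hx : x = ""
    · subst hx
      by_cases hl : acc.getLast? = some ""
      · simp [List.foldl_cons, hl, blankT, ih]
      · rw [List.foldl_cons, if_neg (by simp [hl]), ih]
        simp [hl, blankT]
    · rw [List.foldl_cons, if_neg (by simp [hx]), ih]
      simp [hx, blankT]

theorem foldl_collapse (M : List String) (acc : List String) :
    M.foldl (fun result line =>
      if line = "" ∧ (result = [] ∨ result.getLast? = some "") then result
      else result ++ [line]) acc
    = acc ++ blankT (decide (acc = [] ∨ acc.getLast? = some "")) M := by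
  induction M generalizing acc with
  | nil => simp [blankT]
  | cons x xs ih =>
    by_cases hx : x = ""
    · subst hx
      by_cases hl : acc = [] ∨ acc.getLast? = some ""
      · simp [List.foldl_cons, hl, blankT, ih]
      · rw [List.foldl_cons, if_neg (by simp [hl]), ih]
        simp [hl, blankT]
    · rw [List.foldl_cons, if_neg (by simp [hx]), ih]
      simp [hx, blankT]

theorem blankT_true_dropLead (L : List String) :
    blankT true L = blankT false (pyDropLeadingBlanks L) := by
  induction L with
  | nil => rfl
  | cons x xs ih =>
    by_cases hx : x = ""
    · simp [blankT, pyDropLeadingBlanks, hx, ih]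
    · simp [blankT, pyDropLeadingBlanks, hx]

theorem dropTrail_eq_nil_iff (l : List String) :
    pyDropTrailingBlanks l = [] ↔ ∀ y ∈ l, y = "" := by
  induction l with
  | nil => simp [pyDropTrailingBlanks]
  | cons x xs ih =>
    by_cases hx : x = "" <;> simp [pyDropTrailingBlanks, hx, ih]

theorem popTrail_eq_dropTrail (l : List String) :
    pyPopTrailingBlanks l = pyDropTrailingBlanks l := by
  induction l with
  | nil => rfl
  | cons x xs ih => simp [pyPopTrailingBlanks, pyDropTrailingBlanks, ih]

theorem blankT_allBlank_iff (l : List String) (b : Bool) :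
    (∀ y ∈ blankT b l, y = "") ↔ ∀ y ∈ l, y = "" := by
  induction l generalizing b with
  | nil => simp [blankT]
  | cons x xs ih =>
    by_cases hx : x = ""
    · cases b <;> simp [blankT, hx, ih]
    · simp [blankT, hx, ih]

theorem blankT_dropTrail_comm (M : List String) (b : Bool) :
    blankT b (pyDropTrailingBlanks M) = pyDropTrailingBlanks (blankT b M) := by
  induction M generalizing b with
  | nil => rfl
  | cons x xs ih =>
    by_cases hx : x = ""
    · subst hx
      by_cases hr : pyDropTrailingBlanks xs = []
      · have hxb : ∀ y ∈ xs, y = "" := (dropTrail_eq_nil_iff xs).mp hr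
        have hTb : pyDropTrailingBlanks (blankT true xs) = [] :=
          (dropTrail_eq_nil_iff _).mpr ((blankT_allBlank_iff xs true).mpr hxb)
        cases b <;>
          simp [pyDropTrailingBlanks, hr, blankT, hTb]
      · have hTb : pyDropTrailingBlanks (blankT true xs) ≠ [] := by
          intro h
          exact hr ((dropTrail_eq_nil_iff xs).mpr
            ((blankT_allBlank_iff xs true).mp ((dropTrail_eq_nil_iff _).mp h)))
        cases b <;>
          simp [pyDropTrailingBlanks, hr, blankT, ih, hTb]
    · simp [pyDropTrailingBlanks, hx, blankT, ih]

-- ===== VERDICT (by name: the statement is the Claim_ definition above) =====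
theorem indent_lines_spec : Claim_equal_indent_lines := by
  intro lines width _
  unfold Spec_indent_lines indent_lines indent_lines_alt strip_blank_lines
  set f : String → String :=
    fun line => if line ≠ "" then String.ofList (PySem.List.pyRepeat [' '] width) ++ line else line with hf
  have hA : lines.foldl
      (fun indented_lines line => indented_lines ++ [f line]) ([] : List String)
      = lines.map f := by
    simpa using PySem.List.foldl_append_singleton_eq_map (f := f) (l := lines) (acc := [])
  have hB : lines.foldl
      (fun result line =>
        if f line = "" ∧ (result = [] ∨ result.getLast? = some "") then result
        else result ++ [f line]) ([] : List String)
      = (lines.map f).foldl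
        (fun result line =>
          if line = "" ∧ (result = [] ∨ result.getLast? = some "") then result
          else result ++ [line]) ([] : List String) := by
    rw [List.foldl_map]
  rw [hA, hB, foldl_collapse, foldl_strip, popTrail_eq_dropTrail]
  have e1 : (decide ((([] : List String)).getLast? = some "")) = false := by decide
  have e2 : (decide ((([] : List String)) = [] ∨ (([] : List String)).getLast? = some "")) = true := by decide
  rw [e1, e2, List.nil_append, List.nil_append, blankT_true_dropLead, blankT_dropTrail_comm]
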